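-- pv_equiv track=rewrite | github.com/zhengke1111/HSCOP_classification | tree/utils.py | get_positions_in_complete_binary_tree
-- ===== SOURCE A (Python) =====
-- from collections import deque
--
-- def get_positions_in_complete_binary_tree(children_left, children_right, depth):
--     """
--     Map each node of a given binary tree to its corresponding position in the array representation of a complete binary tree of depth `depth`.
--
--     This function assumes that the input tree is described by two arrays:
--     - `children_left[node]`: the index of the left child of `node`,
--     - `children_right[node]`: the index of the right child of `node`.
--
--     If a node does not have a left or right child, the corresponding value is `-1`.
--
--     The function starts from the root node `0` and performs a level-order (breadth-first) traversal. During this traversal, each existing node is placed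
--     into the position it would occupy in a complete binary tree stored as an array:
--
--     - the root is placed at position `0`,
--     - if a node is placed at position `p`, then
--     - its left child is placed at position `2*p + 1`,
--     - its right child is placed at position `2*p + 2`.
--
--     The output is a list of length `2 ** (depth + 1) - 1`, corresponding to all positions in a complete binary tree of depth `depth`. If some positions do not
--     contain any actual node from the input tree, they remain `-1`.
--
--     Example:
--         Suppose the input tree is
--              0
--             / \
--            1   2
--               /
--              3
--         Then we can represent it by
--             children_left  = [1, -1, 3, -1]
--             children_right = [2, -1, -1, -1]
--
--         If `depth = 2`, then a complete binary tree of depth 2 has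
--         `2 ** (2 + 1) - 1 = 7` positions:
--                    position 0
--                   /          \
--            position 1       position 2
--              /    \           /    \
--             3      4         5      6
--
--         The nodes are placed as follows:
--         - node `0` goes to position `0`,
--         - node `1` goes to position `1`,
--         - node `2` goes to position `2`,
--         - node `3` is the left child of node `2`, so it goes to position `5`.
--
--         Therefore, the returned list is
--             [0, 1, 2, -1, -1, 3, -1]
--
--         This means:
--         - position 0 contains node 0,
--         - position 1 contains node 1,
--         - position 2 contains node 2,
--         - position 5 contains node 3,
--         - all other positions are empty.
--
--     Args:
--         children_left (array-like):
--             A list or array such that `children_left[node]` is the index of the left child of `node`, or `-1` if the node has no left child.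
--
--         children_right (array-like):
--             A list or array such that `children_right[node]` is the index of the right child of `node`, or `-1` if the node has no right child.
--
--         depth (int):
--             The depth of the target complete binary tree. The returned list has length `2 ** (depth + 1) - 1`.
--
--     Returns:
--         list[int]:
--             A list representing the positions of the actual tree nodes inside the complete binary tree array. The value at each position is the node
--             index of the original tree, and positions with no corresponding node are filled with `-1`.
--     """
--     total_nodes = 2 ** (depth + 1) - 1
--     level_order_positions = [-1] * total_nodes
--     queue = deque([(0, 0)])
--     while queue:
--         node, position = queue.popleft()
--         level_order_positions[position] = node
--         if children_left[node] != -1: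
--             queue.append((children_left[node], 2 * position + 1))
--         if children_right[node] != -1:
--             queue.append((children_right[node], 2 * position + 2))
--     return level_order_positions
-- ===== SOURCE B (Python) =====
-- def get_positions_in_complete_binary_tree(children_left, children_right, depth):
--     # One forward sweep over the output array, using it as its own worklist: the node
--     # stored at position p scatters its children into positions 2p+1 and 2p+2.
--     total = 2 ** (depth + 1) - 1
--     positions = [-1] * total
--     if total > 0:
--         positions[0] = 0
--     for p in range(total):
--         node = positions[p]
--         if node == -1:
--             continue
--         left = children_left[node]
--         right = children_right[node]
--         if left != -1:
--             positions[2 * p + 1] = left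
--         if right != -1:
--             positions[2 * p + 2] = right
--     return positions
-- ===== Notes on version B (the rewrite author's own statement) =====
-- stated objective: simpler
-- what changed: Replaces the BFS deque of (node, position) pairs with a single indexed forward sweep over the output array itself, scattering each placed node's children into positions 2p+1 and 2p+2.
import Mathlib
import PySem

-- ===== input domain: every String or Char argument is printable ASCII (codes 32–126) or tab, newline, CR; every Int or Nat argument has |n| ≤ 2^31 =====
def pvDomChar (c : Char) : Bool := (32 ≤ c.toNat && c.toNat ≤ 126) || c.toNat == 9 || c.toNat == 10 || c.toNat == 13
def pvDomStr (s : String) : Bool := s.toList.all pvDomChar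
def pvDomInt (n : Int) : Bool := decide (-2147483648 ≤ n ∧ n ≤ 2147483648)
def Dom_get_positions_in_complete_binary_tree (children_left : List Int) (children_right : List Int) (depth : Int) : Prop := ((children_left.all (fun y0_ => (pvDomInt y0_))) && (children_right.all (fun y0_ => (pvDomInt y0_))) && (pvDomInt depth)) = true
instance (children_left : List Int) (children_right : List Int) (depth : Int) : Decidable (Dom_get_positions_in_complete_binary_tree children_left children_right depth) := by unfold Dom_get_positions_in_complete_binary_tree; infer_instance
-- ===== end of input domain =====

-- B replaces A's BFS deque of (node, position) pairs with a single indexed forward sweep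
-- over the output array itself (the node at position p scatters its children into
-- positions 2p+1 and 2p+2): simpler, same asymptotic cost.

-- total_nodes = 2 ** (depth + 1) - 1 (shared arithmetic; for depth ≤ -2 Python raises, the
-- toNat clamp only affects inputs outside Pre_)
def pvTotal (depth : Int) : Nat := 2 ^ (depth + 1).toNat - 1

-- ===== PORT A =====
-- the while-loop over the deque; fuel = total_nodes is enough for every input admitted by
-- Pre_ (each iteration fills a fresh position); the early-return arms are exactly Python's
-- IndexError points, excluded by Pre_
def pvALoop (cl cr : List Int) : Nat → List Int → List (Int × Int) → List Int
  | _, arr, [] => arr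
  | 0, arr, _ => arr
  | fuel+1, arr, (node, pos) :: rest =>
    if 0 ≤ pos ∧ pos.toNat < arr.length then
      let arr' := arr.set pos.toNat node          -- positions[position] = node
      match PySem.List.pyGet? cl node, PySem.List.pyGet? cr node with
      | some l, some r =>
        pvALoop cl cr fuel arr'
          (rest ++ (if l ≠ -1 then [(l, 2*pos+1)] else [])
                ++ (if r ≠ -1 then [(r, 2*pos+2)] else []))
      | _, _ => arr'                              -- IndexError reading children (outside Pre_)
    else arr                                      -- IndexError writing positions[position] (outside Pre_)

def get_positions_in_complete_binary_tree (children_left : List Int) (children_right : List Int) (depth : Int) : List Int :=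
  pvALoop children_left children_right (pvTotal depth)
    (List.replicate (pvTotal depth) (-1)) [(0, 0)]

-- ===== PORT B =====
-- the 'for p in range(total)' scatter sweep; a failed child read or an out-of-range
-- write is Python's IndexError (outside Pre_): the port skips it
def pvBScatter (cl cr : List Int) : List Nat → List Int → List Int
  | [], arr => arr
  | p :: ps, arr =>
    let node := arr.getD p (-1)                    -- node = positions[p]
    if node = -1 then pvBScatter cl cr ps arr
    else
      match PySem.List.pyGet? cl node, PySem.List.pyGet? cr node with
      | some l, some r =>
        let arr1 := if l ≠ -1 ∧ 2*p+1 < arr.length then arr.set (2*p+1) l else arr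
        let arr2 := if r ≠ -1 ∧ 2*p+2 < arr1.length then arr1.set (2*p+2) r else arr1
        pvBScatter cl cr ps arr2
      | _, _ => pvBScatter cl cr ps arr            -- IndexError reading children (outside Pre_)

def get_positions_in_complete_binary_tree_alt (children_left : List Int) (children_right : List Int) (depth : Int) : List Int :=
  let total := pvTotal depth
  let positions := List.replicate total (-1)
  let positions := if 0 < total then positions.set 0 0 else positions
  pvBScatter children_left children_right (List.range total) positions

-- the distinct node values placed on one level of the array (level 0 = the root);
-- children that are -1 or unreadable produce no entry
def pvLevelStep (cl cr : List Int) (ms : List Int) : List Int :=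
  (ms.flatMap (fun m =>
    (match PySem.List.pyGet? cl m with
     | some c => if c ≠ -1 then [c] else []
     | none => []) ++
    (match PySem.List.pyGet? cr m with
     | some c => if c ≠ -1 then [c] else []
     | none => []))).dedup

def pvLevel (cl cr : List Int) : Nat → List Int
  | 0 => [0]
  | k + 1 => pvLevelStep cl cr (pvLevel cl cr k)

-- exactly the inputs on which Python A returns: depth ≥ 0, both child entries of every
-- placed node are readable, nodes on the bottom row (level depth) have no children (else a
-- child's position overflows the array and A raises IndexError), and no node is still
-- alive at level 2*len+1 (a live path that long must repeat a node value, i.e. loop, and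
-- would overflow the array).  Only the first min(depth+1, 2*len+1) levels can be non-empty
-- on a passing input, so this is checkable without touching all 2^(depth+1)-1 positions.
def Pre_get_positions_in_complete_binary_tree (children_left : List Int) (children_right : List Int) (depth : Int) : Prop :=
  0 ≤ depth ∧
  (∀ k < min (depth + 1).toNat (2 * children_left.length + 1),
      ∀ m ∈ pvLevel children_left children_right k,
        (PySem.List.pyGet? children_left m).isSome ∧
        (PySem.List.pyGet? children_right m).isSome) ∧
  ((depth + 1).toNat ≤ 2 * children_left.length + 1 →
      ∀ m ∈ pvLevel children_left children_right ((depth + 1).toNat - 1),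
        PySem.List.pyGet? children_left m = some (-1) ∧
        PySem.List.pyGet? children_right m = some (-1)) ∧
  (2 * children_left.length + 1 < (depth + 1).toNat →
      pvLevel children_left children_right (2 * children_left.length) = [])

instance (children_left : List Int) (children_right : List Int) (depth : Int) : Decidable (Pre_get_positions_in_complete_binary_tree children_left children_right depth) := by unfold Pre_get_positions_in_complete_binary_tree; infer_instance

def pvWitness_get_positions_in_complete_binary_tree : List Int × List Int × Int :=
  ([1, -1, 3, -1], [2, -1, -1, -1], 2)

def Spec_get_positions_in_complete_binary_tree (children_left : List Int) (children_right : List Int) (depth : Int) (out : List Int) : Prop := out = get_positions_in_complete_binary_tree_alt children_left children_right depth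
instance (children_left : List Int) (children_right : List Int) (depth : Int) (out : List Int) : Decidable (Spec_get_positions_in_complete_binary_tree children_left children_right depth out) := by unfold Spec_get_positions_in_complete_binary_tree; infer_instance

-- ===== CLAIM (what is proved, stated in full; the proofs are below) =====
def Claim_equal_get_positions_in_complete_binary_tree : Prop := ∀ (children_left : List Int) (children_right : List Int) (depth : Int), Dom_get_positions_in_complete_binary_tree children_left children_right depth → Pre_get_positions_in_complete_binary_tree children_left children_right depth → Spec_get_positions_in_complete_binary_tree children_left children_right depth (get_positions_in_complete_binary_tree children_left children_right depth)


-- ===== LEMMAS AND PROOFS =====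

-- the node occupying array position q (-1 = empty): the root is node 0, and the node at q
-- is the left/right child entry of the node at the parent position (q-1)/2
def pvFillValAux (cl cr : List Int) : Nat → Nat → Int
  | _, 0 => 0
  | 0, _ + 1 => -1        -- never reached when fuel ≥ q
  | f + 1, q + 1 =>
    let par := pvFillValAux cl cr f (q / 2)
    if par = -1 then -1
    else (PySem.List.pyGet? (if (q + 1) % 2 = 1 then cl else cr) par).getD (-1)

def pvFillVal (cl cr : List Int) (q : Nat) : Int := pvFillValAux cl cr q q

-- the (weak) ancestors of array position q: q, its parent (q-1)/2, … up to the root 0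
def pvAnc (q : Nat) : List Nat :=
  if q = 0 then [0] else q :: pvAnc ((q - 1) / 2)
termination_by q
decreasing_by omega

lemma pvAnc_self (q : Nat) : q ∈ pvAnc q := by
  unfold pvAnc; split <;> simp_all

lemma pvAnc_zero (q : Nat) : 0 ∈ pvAnc q := by
  induction q using Nat.strong_induction_on with
  | _ q ih =>
    unfold pvAnc; split
    · simp
    · exact List.mem_cons_of_mem _ (ih _ (by omega))

lemma pvAnc_le {a q : Nat} (h : a ∈ pvAnc q) : a ≤ q := by
  induction q using Nat.strong_induction_on with
  | _ q ih =>
    rw [pvAnc] at h; split at h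
    · rename_i hq; simp only [List.mem_singleton] at h; omega
    · rcases List.mem_cons.1 h with h | h
      · omega
      · have := ih _ (by omega) h; omega

lemma pvAnc_trans {a b q : Nat} (ha : a ∈ pvAnc q) (hb : b ∈ pvAnc a) : b ∈ pvAnc q := by
  induction q using Nat.strong_induction_on with
  | _ q ih =>
    rw [pvAnc] at ha; split at ha
    · rename_i hq; subst hq
      simp only [List.mem_singleton] at ha; subst ha
      simpa [pvAnc] using hb
    · rcases List.mem_cons.1 ha with h | h
      · subst h; exact hb
      · rename_i hq
        have hb' := ih _ (by omega) h
        rw [pvAnc]; simp only [hq, if_false]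
        exact List.mem_cons_of_mem _ hb'

lemma pvAnc_left (p : Nat) : p ∈ pvAnc (2*p+1) := by
  rw [pvAnc]
  have h1 : ¬ (2*p+1 = 0) := by omega
  have h2 : (2*p+1-1)/2 = p := by omega
  rw [if_neg h1, h2]
  exact List.mem_cons_of_mem _ (pvAnc_self p)

lemma pvAnc_right (p : Nat) : p ∈ pvAnc (2*p+2) := by
  rw [pvAnc]
  have h1 : ¬ (2*p+2 = 0) := by omega
  have h2 : (2*p+2-1)/2 = p := by omega
  rw [if_neg h1, h2]
  exact List.mem_cons_of_mem _ (pvAnc_self p)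

lemma pvAnc_split {p q : Nat} (h : p ∈ pvAnc q) (hne : q ≠ p) :
    (2*p+1) ∈ pvAnc q ∨ (2*p+2) ∈ pvAnc q := by
  induction q using Nat.strong_induction_on with
  | _ q ih =>
    rw [pvAnc] at h; split at h
    · rename_i hq; subst hq; simp only [List.mem_singleton] at h; omega
    · rename_i hq0
      rcases List.mem_cons.1 h with h | h
      · omega
      · by_cases hpar : (q-1)/2 = p
        · have : q = 2*p+1 ∨ q = 2*p+2 := by omega
          rcases this with h' | h' <;> [left; right] <;> (subst h'; exact pvAnc_self _)
        · rcases ih _ (by omega) h hpar with h' | h' <;> [left; right] <;>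
            · rw [pvAnc, if_neg hq0]; exact List.mem_cons_of_mem _ h'

lemma pvFillValAux_congr (cl cr : List Int) : ∀ (q f : Nat), q ≤ f →
    pvFillValAux cl cr f q = pvFillVal cl cr q := by
  intro q
  induction q using Nat.strong_induction_on with
  | _ q ih =>
    intro f hq
    match q, f with
    | 0, 0 => rfl
    | 0, _ + 1 => rfl
    | q' + 1, f' + 1 =>
      show pvFillValAux cl cr (f'+1) (q'+1) = pvFillValAux cl cr (q'+1) (q'+1)
      rw [pvFillValAux, pvFillValAux]
      rw [ih (q'/2) (by omega) f' (by omega), ih (q'/2) (by omega) q' (by omega)]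

lemma pvFillVal_eq (cl cr : List Int) (q : Nat) :
    pvFillVal cl cr q =
      if q = 0 then 0
      else
        if pvFillVal cl cr ((q - 1) / 2) = -1 then -1
        else (PySem.List.pyGet? (if q % 2 = 1 then cl else cr)
               (pvFillVal cl cr ((q - 1) / 2))).getD (-1) := by
  match q with
  | 0 => rfl
  | q' + 1 =>
    show pvFillValAux cl cr (q'+1) (q'+1) = _
    rw [pvFillValAux]
    rw [pvFillValAux_congr cl cr (q'/2) q' (by omega)]
    simp only [Nat.add_sub_cancel]
    rfl

lemma pvFill_left (cl cr : List Int) (p : Nat) :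
    pvFillVal cl cr (2*p+1) =
      if pvFillVal cl cr p = -1 then -1 else (PySem.List.pyGet? cl (pvFillVal cl cr p)).getD (-1) := by
  have h1 : ¬ (2*p+1 = 0) := by omega
  have h2 : (2*p+1-1)/2 = p := by omega
  rw [pvFillVal_eq]
  have h3 : (2*p+1) % 2 = 1 := by omega
  rw [if_neg h1, h2]
  simp [h3]

lemma pvFill_right (cl cr : List Int) (p : Nat) :
    pvFillVal cl cr (2*p+2) =
      if pvFillVal cl cr p = -1 then -1 else (PySem.List.pyGet? cr (pvFillVal cl cr p)).getD (-1) := by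
  have h1 : ¬ (2*p+2 = 0) := by omega
  have h2 : (2*p+2-1)/2 = p := by omega
  rw [pvFillVal_eq]
  have h3 : ¬ ((2*p+2) % 2 = 1) := by omega
  rw [if_neg h1, h2]
  simp [h3]

lemma pvFill_neg_desc (cl cr : List Int) {a q : Nat}
    (ha : pvFillVal cl cr a = -1) (hm : a ∈ pvAnc q) : pvFillVal cl cr q = -1 := by
  induction q using Nat.strong_induction_on with
  | _ q ih =>
    unfold pvAnc at hm; split at hm
    · simp_all
    · rcases List.mem_cons.1 hm with h | h
      · subst h; exact ha
      · rename_i hq0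
        have hpar := ih _ (by omega) h
        rw [pvFillVal_eq]; simp [hq0, hpar]

lemma pvAnc_left_eq (p : Nat) : pvAnc (2*p+1) = (2*p+1) :: pvAnc p := by
  rw [pvAnc, if_neg (by omega : ¬ (2*p+1 = 0)), (by omega : (2*p+1-1)/2 = p)]

lemma pvAnc_right_eq (p : Nat) : pvAnc (2*p+2) = (2*p+2) :: pvAnc p := by
  rw [pvAnc, if_neg (by omega : ¬ (2*p+2 = 0)), (by omega : (2*p+2-1)/2 = p)]

-- positions still to be written while the queue is qns
def pvPend (cl cr : List Int) (T : Nat) (qns : List Nat) : Finset Nat :=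
  (Finset.range T).filter (fun q => pvFillVal cl cr q ≠ -1 ∧ ∃ p ∈ qns, p ∈ pvAnc q)

lemma pvArrDone (cl cr : List Int) (T : Nat) (arr : List Int)
    (hlen : arr.length = T)
    (h : ∀ q, q < T → arr.getD q 0 = pvFillVal cl cr q) :
    arr = (List.range T).map (pvFillVal cl cr) := by
  apply List.ext_getElem
  · simp [hlen]
  · intro i h1 h2
    have hi : i < T := by simpa [hlen] using h1
    have := h i hi
    rw [List.getD_eq_getElem _ _ h1] at this
    simpa using this

lemma pvPend_step (cl cr : List Int) (p : Nat) (rest : List Nat)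
    (hd : ∀ b ∈ rest, p ∉ pvAnc b ∧ b ∉ pvAnc p) :
    ∀ q, (pvFillVal cl cr q ≠ -1 ∧
            ∃ pp ∈ rest ++ (if pvFillVal cl cr (2*p+1) = -1 then [] else [2*p+1])
                        ++ (if pvFillVal cl cr (2*p+2) = -1 then [] else [2*p+2]),
              pp ∈ pvAnc q) ↔
        ((pvFillVal cl cr q ≠ -1 ∧ ∃ pp ∈ p :: rest, pp ∈ pvAnc q) ∧ q ≠ p) := by
  intro q
  constructor
  · rintro ⟨hfq, pp, hpp, hanc⟩
    simp only [List.mem_append] at hpp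
    rcases hpp with (hpp | hpp) | hpp
    · refine ⟨⟨hfq, pp, List.mem_cons_of_mem _ hpp, hanc⟩, ?_⟩
      rintro rfl
      exact (hd pp hpp).2 hanc
    · have hpp1 : pp = 2*p+1 := by
        by_cases h1 : pvFillVal cl cr (2*p+1) = -1 <;> simp [h1] at hpp <;> omega
      subst hpp1
      refine ⟨⟨hfq, p, List.mem_cons_self, pvAnc_trans hanc (pvAnc_left p)⟩, ?_⟩
      rintro rfl
      have := pvAnc_le hanc; omega
    · have hpp2 : pp = 2*p+2 := by
        by_cases h2 : pvFillVal cl cr (2*p+2) = -1 <;> simp [h2] at hpp <;> omega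
      subst hpp2
      refine ⟨⟨hfq, p, List.mem_cons_self, pvAnc_trans hanc (pvAnc_right p)⟩, ?_⟩
      rintro rfl
      have := pvAnc_le hanc; omega
  · rintro ⟨⟨hfq, pp, hpp, hanc⟩, hqp⟩
    rcases List.mem_cons.1 hpp with rfl | hpp
    · rcases pvAnc_split hanc hqp with h | h
      · have hf1 : pvFillVal cl cr (2*pp+1) ≠ -1 :=
          fun hf => hfq (pvFill_neg_desc cl cr hf h)
        refine ⟨hfq, 2*pp+1, ?_, h⟩
        simp [List.mem_append, hf1]
      · have hf2 : pvFillVal cl cr (2*pp+2) ≠ -1 :=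
          fun hf => hfq (pvFill_neg_desc cl cr hf h)
        refine ⟨hfq, 2*pp+2, ?_, h⟩
        simp [List.mem_append, hf2]
    · refine ⟨hfq, pp, ?_, hanc⟩
      simp [List.mem_append, hpp]

lemma pvALoop_inv (cl cr : List Int) (T : Nat)
    (HP1 : ∀ q < T, pvFillVal cl cr q ≠ -1 →
        (PySem.List.pyGet? cl (pvFillVal cl cr q)).isSome ∧ (PySem.List.pyGet? cr (pvFillVal cl cr q)).isSome)
    (HP2 : ∀ q < T, (T - 1) / 2 ≤ q → pvFillVal cl cr q ≠ -1 →
        PySem.List.pyGet? cl (pvFillVal cl cr q) = some (-1) ∧ PySem.List.pyGet? cr (pvFillVal cl cr q) = some (-1)) :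
    ∀ (fuel : Nat) (qns : List Nat) (arr : List Int),
      arr.length = T →
      (∀ p ∈ qns, p < T ∧ pvFillVal cl cr p ≠ -1) →
      List.Pairwise (fun a b => a ∉ pvAnc b ∧ b ∉ pvAnc a) qns →
      (∀ q, q < T → arr.getD q 0 =
        (if pvFillVal cl cr q ≠ -1 ∧ ∃ p ∈ qns, p ∈ pvAnc q then -1 else pvFillVal cl cr q)) →
      (pvPend cl cr T qns).card ≤ fuel →
      pvALoop cl cr fuel arr (qns.map (fun p => (pvFillVal cl cr p, (p : Int)))) =
        (List.range T).map (pvFillVal cl cr) := by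
  intro fuel
  induction fuel with
  | zero =>
    intro qns arr hlen hb hpw harr hcard
    match qns with
    | [] => exact pvArrDone cl cr T arr hlen (fun q hq => by simpa using harr q hq)
    | p :: rest =>
      exfalso
      have hp : p ∈ pvPend cl cr T (p :: rest) := by
        obtain ⟨h1, h2⟩ := hb p (List.mem_cons_self)
        simp only [pvPend, Finset.mem_filter, Finset.mem_range]
        exact ⟨h1, h2, p, List.mem_cons_self, pvAnc_self p⟩
      have := Finset.card_pos.mpr ⟨p, hp⟩
      omega
  | succ fuel ih =>
    intro qns arr hlen hb hpw harr hcard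
    match qns with
    | [] => exact pvArrDone cl cr T arr hlen (fun q hq => by simpa using harr q hq)
    | p :: rest =>
      obtain ⟨hpT, hpf⟩ := hb p List.mem_cons_self
      obtain ⟨hd, hpwr⟩ := List.pairwise_cons.1 hpw
      obtain ⟨l, hcl⟩ := Option.isSome_iff_exists.mp (HP1 p hpT hpf).1
      obtain ⟨r, hcr⟩ := Option.isSome_iff_exists.mp (HP1 p hpT hpf).2
      have hlv : pvFillVal cl cr (2*p+1) = l := by
        rw [pvFill_left, if_neg hpf, hcl]; rfl
      have hrv : pvFillVal cl cr (2*p+2) = r := by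
        rw [pvFill_right, if_neg hpf, hcr]; rfl
      have hc1T : pvFillVal cl cr (2*p+1) ≠ -1 → 2*p+1 < T := by
        intro hne; by_contra hge
        have hbot : (T-1)/2 ≤ p := by omega
        have h := (HP2 p hpT hbot hpf).1
        rw [pvFill_left, if_neg hpf, h] at hne
        simp at hne
      have hc2T : pvFillVal cl cr (2*p+2) ≠ -1 → 2*p+2 < T := by
        intro hne; by_contra hge
        have hbot : (T-1)/2 ≤ p := by omega
        have h := (HP2 p hpT hbot hpf).2
        rw [pvFill_right, if_neg hpf, h] at hne
        simp at hne
      -- the appended children, as Nat positions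
      have hq : (rest.map (fun p => (pvFillVal cl cr p, (p : Int)))) ++
            (if l ≠ -1 then [(l, 2*(p:Int)+1)] else []) ++
            (if r ≠ -1 then [(r, 2*(p:Int)+2)] else []) =
          (rest ++ (if pvFillVal cl cr (2*p+1) = -1 then [] else [2*p+1])
                ++ (if pvFillVal cl cr (2*p+2) = -1 then [] else [2*p+2])).map
            (fun p => (pvFillVal cl cr p, (p : Int))) := by
        have e1 : (if l ≠ -1 then [(l, 2*(p:Int)+1)] else []) =
            (if pvFillVal cl cr (2*p+1) = -1 then ([] : List Nat) else [2*p+1]).map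
              (fun p => (pvFillVal cl cr p, (p : Int))) := by
          rw [← hlv]
          by_cases h : pvFillVal cl cr (2*p+1) = -1
          · simp [h]
          · have hcast : (((2*p+1 : Nat) : Int)) = 2*(p:Int)+1 := by push_cast; ring
            simp [h, hcast]
        have e2 : (if r ≠ -1 then [(r, 2*(p:Int)+2)] else []) =
            (if pvFillVal cl cr (2*p+2) = -1 then ([] : List Nat) else [2*p+2]).map
              (fun p => (pvFillVal cl cr p, (p : Int))) := by
          rw [← hrv]
          by_cases h : pvFillVal cl cr (2*p+2) = -1
          · simp [h]
          · have hcast : (((2*p+2 : Nat) : Int)) = 2*(p:Int)+2 := by push_cast; ring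
            simp [h, hcast]
        rw [e1, e2, ← List.map_append, ← List.map_append]
      have hiff := pvPend_step cl cr p rest hd
      have hmemp : p ∈ pvPend cl cr T (p :: rest) := by
        simp only [pvPend, Finset.mem_filter, Finset.mem_range]
        exact ⟨hpT, hpf, p, List.mem_cons_self, pvAnc_self p⟩
      have hpendE : pvPend cl cr T
            (rest ++ (if pvFillVal cl cr (2*p+1) = -1 then [] else [2*p+1])
                  ++ (if pvFillVal cl cr (2*p+2) = -1 then [] else [2*p+2]))
          = (pvPend cl cr T (p :: rest)).erase p := by
        ext q
        simp only [pvPend, Finset.mem_filter, Finset.mem_range, Finset.mem_erase]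
        constructor
        · rintro ⟨h1, h2⟩
          have := (hiff q).1 h2
          exact ⟨this.2, h1, this.1⟩
        · rintro ⟨h1, h2, h3⟩
          exact ⟨h2, (hiff q).2 ⟨h3, h1⟩⟩
      -- one step of the loop
      simp only [List.map_cons]
      rw [pvALoop]
      have hpos : (0 : Int) ≤ (p : Int) ∧ ((p : Int)).toNat < arr.length :=
        ⟨by positivity, by simp [hlen]; exact hpT⟩
      rw [if_pos hpos]
      simp only [hcl, hcr, Int.toNat_natCast]
      rw [hq]
      apply ih
      · simp [hlen]
      · intro x hx
        simp only [List.mem_append] at hx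
        rcases hx with (hx | hx) | hx
        · exact hb x (List.mem_cons_of_mem _ hx)
        · by_cases h1 : pvFillVal cl cr (2*p+1) = -1
          · simp [h1] at hx
          · simp [h1] at hx; subst hx; exact ⟨hc1T h1, h1⟩
        · by_cases h2 : pvFillVal cl cr (2*p+2) = -1
          · simp [h2] at hx
          · simp [h2] at hx; subst hx; exact ⟨hc2T h2, h2⟩
      · -- pairwise disjoint subtrees of the new queue
        have hnotal : ∀ a ∈ rest, a ∉ pvAnc (2*p+1) ∧ (2*p+1) ∉ pvAnc a := by
          intro a ha
          constructor
          · intro hmem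
            rw [pvAnc_left_eq] at hmem
            rcases List.mem_cons.1 hmem with rfl | hmem
            · exact (hd _ ha).1 (pvAnc_left p)
            · exact (hd _ ha).2 hmem
          · intro hmem
            exact (hd _ ha).1 (pvAnc_trans hmem (pvAnc_left p))
        have hnotar : ∀ a ∈ rest, a ∉ pvAnc (2*p+2) ∧ (2*p+2) ∉ pvAnc a := by
          intro a ha
          constructor
          · intro hmem
            rw [pvAnc_right_eq] at hmem
            rcases List.mem_cons.1 hmem with rfl | hmem
            · exact (hd _ ha).1 (pvAnc_right p)
            · exact (hd _ ha).2 hmem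
          · intro hmem
            exact (hd _ ha).1 (pvAnc_trans hmem (pvAnc_right p))
        rw [List.pairwise_append]
        refine ⟨?_, by split <;> simp, ?_⟩
        · rw [List.pairwise_append]
          refine ⟨hpwr, by split <;> simp, ?_⟩
          intro a ha b hb'
          have hb1 : b = 2*p+1 := by
            by_cases h1 : pvFillVal cl cr (2*p+1) = -1 <;> simp [h1] at hb' <;> omega
          subst hb1
          exact hnotal a ha
        · intro a ha b hb'
          have hb2 : b = 2*p+2 := by
            by_cases h2 : pvFillVal cl cr (2*p+2) = -1 <;> simp [h2] at hb' <;> omega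
          subst hb2
          rcases List.mem_append.1 ha with ha | ha
          · exact hnotar a ha
          · have ha1 : a = 2*p+1 := by
              by_cases h1 : pvFillVal cl cr (2*p+1) = -1 <;> simp [h1] at ha <;> omega
            subst ha1
            constructor
            · intro hmem
              rw [pvAnc_right_eq] at hmem
              rcases List.mem_cons.1 hmem with h | h
              · omega
              · have := pvAnc_le h; omega
            · intro hmem
              rw [pvAnc_left_eq] at hmem
              rcases List.mem_cons.1 hmem with h | h
              · omega
              · have := pvAnc_le h; omega
      · -- the array after writing position p
        intro q hqT
        by_cases hqp : q = p
        · subst hqp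
          rw [show (arr.set q (pvFillVal cl cr q)).getD q 0 = pvFillVal cl cr q by
            simp [List.getD_eq_getElem?_getD,
              List.getElem?_set_self (by rw [hlen]; exact hqT)]]
          rw [if_neg]
          intro hcond
          exact ((hiff q).1 hcond).2 rfl
        · rw [show (arr.set p (pvFillVal cl cr p)).getD q 0 = arr.getD q 0 by
            simp [List.getD_eq_getElem?_getD, List.getElem?_set_ne (by omega : p ≠ q)]]
          rw [harr q hqT]
          by_cases hcond : pvFillVal cl cr q ≠ -1 ∧ ∃ pp ∈ p :: rest, pp ∈ pvAnc q
          · rw [if_pos hcond, if_pos ((hiff q).2 ⟨hcond, hqp⟩)]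
          · rw [if_neg hcond, if_neg (fun hnew => hcond ((hiff q).1 hnew).1)]
      · rw [hpendE, Finset.card_erase_of_mem hmemp]
        omega

lemma pvBScatter_append (cl cr : List Int) (l1 l2 : List Nat) (arr : List Int) :
    pvBScatter cl cr (l1 ++ l2) arr = pvBScatter cl cr l2 (pvBScatter cl cr l1 arr) := by
  induction l1 generalizing arr with
  | nil => rfl
  | cons p ps ih =>
    rw [List.cons_append, pvBScatter, pvBScatter]
    split
    · exact ih _
    · split <;> exact ih _

lemma pvBScatter_nil (cl cr : List Int) (arr : List Int) : pvBScatter cl cr [] arr = arr := rfl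

lemma pvBScatter_cons_some (cl cr : List Int) (p : Nat) (ps : List Nat) (arr : List Int)
    (l r : Int) (hn : arr.getD p (-1) ≠ -1)
    (hl : PySem.List.pyGet? cl (arr.getD p (-1)) = some l)
    (hr : PySem.List.pyGet? cr (arr.getD p (-1)) = some r) :
    pvBScatter cl cr (p :: ps) arr = pvBScatter cl cr ps
      (if r ≠ -1 ∧ 2*p+2 < (if l ≠ -1 ∧ 2*p+1 < arr.length then arr.set (2*p+1) l else arr).length
        then (if l ≠ -1 ∧ 2*p+1 < arr.length then arr.set (2*p+1) l else arr).set (2*p+2) r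
        else (if l ≠ -1 ∧ 2*p+1 < arr.length then arr.set (2*p+1) l else arr)) := by
  rw [pvBScatter, if_neg hn, hl, hr]

lemma pvSet_map_range (T j : Nat) (v : Int) (f : Nat → Int) (h : j < T) :
    ((List.range T).map f).set j v =
      (List.range T).map (fun q => if q = j then v else f q) := by
  apply List.ext_getElem
  · simp
  · intro i h1 h2
    simp only [List.length_set, List.length_map, List.length_range] at h1
    rw [List.getElem_set]
    by_cases hij : j = i
    · subst hij; simp
    · simp only [if_neg hij, List.getElem_map, List.getElem_range]
      rw [if_neg (fun hh => hij hh.symm)]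

lemma pvBScatter_inv (cl cr : List Int) (T : Nat) (hT : 0 < T)
    (HP1 : ∀ q < T, pvFillVal cl cr q ≠ -1 →
        (PySem.List.pyGet? cl (pvFillVal cl cr q)).isSome ∧ (PySem.List.pyGet? cr (pvFillVal cl cr q)).isSome) :
    ∀ n, n ≤ T →
      pvBScatter cl cr (List.range n) ((List.replicate T (-1 : Int)).set 0 0) =
        (List.range T).map (fun q => if q ≤ 2*n then pvFillVal cl cr q else -1) := by
  intro n
  induction n with
  | zero =>
    intro _
    rw [show List.range 0 = ([] : List Nat) from rfl, pvBScatter_nil]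
    apply List.ext_getElem
    · simp
    · intro i h1 h2
      have hi : i < T := by simpa using h1
      rw [List.getElem_set]
      by_cases h0 : i = 0
      · subst h0
        simp [pvFillVal, pvFillValAux]
      · rw [if_neg (fun h => h0 h.symm), List.getElem_replicate]
        simp only [List.getElem_map, List.getElem_range]
        rw [if_neg (by omega : ¬ i ≤ 2*0)]
  | succ n ih =>
    intro hn1
    rw [List.range_succ, pvBScatter_append, ih (by omega)]
    have hnT : n < T := by omega
    have hnode : ((List.range T).map (fun q => if q ≤ 2*n then pvFillVal cl cr q else -1)).getD
        n (-1) = pvFillVal cl cr n := by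
      rw [List.getD_eq_getElem _ _ (by simpa using hnT)]
      simp [(by omega : n ≤ 2*n)]
    by_cases hf : pvFillVal cl cr n = -1
    · rw [pvBScatter, hnode, if_pos hf, pvBScatter_nil]
      have hl : pvFillVal cl cr (2*n+1) = -1 := by rw [pvFill_left, if_pos hf]
      have hr : pvFillVal cl cr (2*n+2) = -1 := by rw [pvFill_right, if_pos hf]
      apply List.map_congr_left
      intro q hq
      by_cases hle : q ≤ 2*n
      · rw [if_pos hle, if_pos (by omega : q ≤ 2*(n+1))]
      · by_cases hle2 : q ≤ 2*(n+1)
        · rw [if_neg hle, if_pos hle2]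
          have : q = 2*n+1 ∨ q = 2*n+2 := by omega
          rcases this with h | h <;> rw [h] <;> [exact hl.symm; exact hr.symm]
        · rw [if_neg hle, if_neg hle2]
    · obtain ⟨l, hcl⟩ := Option.isSome_iff_exists.mp (HP1 n hnT hf).1
      obtain ⟨r, hcr⟩ := Option.isSome_iff_exists.mp (HP1 n hnT hf).2
      have hlv : pvFillVal cl cr (2*n+1) = l := by
        rw [pvFill_left, if_neg hf, hcl]; rfl
      have hrv : pvFillVal cl cr (2*n+2) = r := by
        rw [pvFill_right, if_neg hf, hcr]; rfl
      rw [pvBScatter_cons_some cl cr n [] _ l r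
          (by rw [hnode]; exact hf) (by rw [hnode]; exact hcl) (by rw [hnode]; exact hcr),
        pvBScatter_nil]
      split_ifs with hg1 hg2 hg3
      · -- both children written
        have h1T : 2*n+1 < T := by simpa using hg1.2
        have h2T : 2*n+2 < T := by simpa using hg2.2
        rw [pvSet_map_range _ _ _ _ h1T, pvSet_map_range _ _ _ _ h2T]
        apply List.map_congr_left
        intro q hq
        have hqT : q < T := List.mem_range.1 hq
        by_cases hq2 : q = 2*n+2
        · subst hq2
          rw [if_pos rfl, if_pos (by omega : 2*n+2 ≤ 2*(n+1))]
          exact hrv.symm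
        · rw [if_neg hq2]
          by_cases hq1 : q = 2*n+1
          · subst hq1
            rw [if_pos rfl, if_pos (by omega : 2*n+1 ≤ 2*(n+1))]
            exact hlv.symm
          · rw [if_neg hq1]
            by_cases hle : q ≤ 2*n
            · rw [if_pos hle, if_pos (by omega : q ≤ 2*(n+1))]
            · rw [if_neg hle, if_neg (by omega : ¬ (q ≤ 2*(n+1)))]
      · -- only the left child written
        have h1T : 2*n+1 < T := by simpa using hg1.2
        have hg2' : ¬ (r ≠ -1 ∧ 2*n+2 < T) := by simpa using hg2
        rw [pvSet_map_range _ _ _ _ h1T]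
        apply List.map_congr_left
        intro q hq
        have hqT : q < T := List.mem_range.1 hq
        by_cases hq2 : q = 2*n+2
        · subst hq2
          have hrneg : r = -1 := by
            by_contra hrn
            exact hg2' ⟨hrn, hqT⟩
          rw [if_neg (by omega : ¬ (2*n+2 = 2*n+1)),
            if_neg (by omega : ¬ (2*n+2 ≤ 2*n)),
            if_pos (by omega : 2*n+2 ≤ 2*(n+1)), hrv, hrneg]
        · by_cases hq1 : q = 2*n+1
          · subst hq1
            rw [if_pos rfl, if_pos (by omega : 2*n+1 ≤ 2*(n+1))]
            exact hlv.symm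
          · rw [if_neg hq1]
            by_cases hle : q ≤ 2*n
            · rw [if_pos hle, if_pos (by omega : q ≤ 2*(n+1))]
            · rw [if_neg hle, if_neg (by omega : ¬ (q ≤ 2*(n+1)))]
      · -- only the right child written
        have hg1' : ¬ (l ≠ -1 ∧ 2*n+1 < T) := by simpa using hg1
        have h2T : 2*n+2 < T := by simpa using hg3.2
        rw [pvSet_map_range _ _ _ _ h2T]
        apply List.map_congr_left
        intro q hq
        have hqT : q < T := List.mem_range.1 hq
        by_cases hq2 : q = 2*n+2
        · subst hq2
          rw [if_pos rfl, if_pos (by omega : 2*n+2 ≤ 2*(n+1))]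
          exact hrv.symm
        · rw [if_neg hq2]
          by_cases hq1 : q = 2*n+1
          · subst hq1
            have hlneg : l = -1 := by
              by_contra hln
              exact hg1' ⟨hln, hqT⟩
            rw [if_neg (by omega : ¬ (2*n+1 ≤ 2*n)),
              if_pos (by omega : 2*n+1 ≤ 2*(n+1)), hlv, hlneg]
          · by_cases hle : q ≤ 2*n
            · rw [if_pos hle, if_pos (by omega : q ≤ 2*(n+1))]
            · rw [if_neg hle, if_neg (by omega : ¬ (q ≤ 2*(n+1)))]
      · -- neither child written
        have hg1' : ¬ (l ≠ -1 ∧ 2*n+1 < T) := by simpa using hg1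
        have hg3' : ¬ (r ≠ -1 ∧ 2*n+2 < T) := by simpa using hg3
        apply List.map_congr_left
        intro q hq
        have hqT : q < T := List.mem_range.1 hq
        by_cases hq2 : q = 2*n+2
        · subst hq2
          have hrneg : r = -1 := by
            by_contra hrn
            exact hg3' ⟨hrn, hqT⟩
          rw [if_neg (by omega : ¬ (2*n+2 ≤ 2*n)),
            if_pos (by omega : 2*n+2 ≤ 2*(n+1)), hrv, hrneg]
        · by_cases hq1 : q = 2*n+1
          · subst hq1
            have hlneg : l = -1 := by
              by_contra hln
              exact hg1' ⟨hln, hqT⟩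
            rw [if_neg (by omega : ¬ (2*n+1 ≤ 2*n)),
              if_pos (by omega : 2*n+1 ≤ 2*(n+1)), hlv, hlneg]
          · by_cases hle : q ≤ 2*n
            · rw [if_pos hle, if_pos (by omega : q ≤ 2*(n+1))]
            · rw [if_neg hle, if_neg (by omega : ¬ (q ≤ 2*(n+1)))]

-- a non-empty position in the level-k slice of the array carries a node listed in pvLevel k
lemma pvLevel_complete (cl cr : List Int) : ∀ (k q : Nat),
    2^k - 1 ≤ q → q < 2^(k+1) - 1 → pvFillVal cl cr q ≠ -1 →
    pvFillVal cl cr q ∈ pvLevel cl cr k := by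
  intro k
  induction k with
  | zero =>
    intro q h1 h2 h3
    have hq0 : q = 0 := by omega
    subst hq0
    show pvFillVal cl cr 0 ∈ [0]
    simp [pvFillVal, pvFillValAux]
  | succ k ih =>
    intro q h1 h2 h3
    have e1 : 2^(k+1) = 2 * 2^k := by ring
    have e2 : 2^(k+2) = 2 * 2^(k+1) := by ring
    have hq0 : ¬ (q = 0) := by omega
    have hp1 : 2^k - 1 ≤ (q-1)/2 := by omega
    have hp2 : (q-1)/2 < 2^(k+1) - 1 := by omega
    have hpf : pvFillVal cl cr ((q-1)/2) ≠ -1 := by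
      intro hf
      apply h3
      rw [pvFillVal_eq, if_neg hq0, if_pos hf]
    have hmem := ih _ hp1 hp2 hpf
    have hstep : pvFillVal cl cr q =
        (PySem.List.pyGet? (if q % 2 = 1 then cl else cr)
          (pvFillVal cl cr ((q-1)/2))).getD (-1) := by
      rw [pvFillVal_eq, if_neg hq0, if_neg hpf]
    have hval : PySem.List.pyGet? (if q % 2 = 1 then cl else cr)
        (pvFillVal cl cr ((q-1)/2)) = some (pvFillVal cl cr q) := by
      cases hc : PySem.List.pyGet? (if q % 2 = 1 then cl else cr)
          (pvFillVal cl cr ((q-1)/2)) with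
      | none => rw [hstep, hc] at h3; simp at h3
      | some c => rw [hstep, hc]; rfl
    show pvFillVal cl cr q ∈ pvLevelStep cl cr (pvLevel cl cr k)
    unfold pvLevelStep
    rw [List.mem_dedup]
    refine List.mem_flatMap.2 ⟨pvFillVal cl cr ((q-1)/2), hmem, ?_⟩
    by_cases hodd : q % 2 = 1
    · rw [hodd] at hval; simp only [if_true] at hval
      exact List.mem_append.2 (Or.inl (by rw [hval]; simp [h3]))
    · rw [if_neg hodd] at hval
      exact List.mem_append.2 (Or.inr (by rw [hval]; simp [h3]))

-- once a whole level of the array is empty, everything below it is empty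
lemma pvFill_dead (cl cr : List Int) (j : Nat)
    (hdead : ∀ q, 2^j - 1 ≤ q → q < 2^(j+1) - 1 → pvFillVal cl cr q = -1) :
    ∀ q, 2^j - 1 ≤ q → pvFillVal cl cr q = -1 := by
  intro q
  induction q using Nat.strong_induction_on with
  | _ q ih =>
    intro hq
    by_cases hlt : q < 2^(j+1) - 1
    · exact hdead q hq hlt
    · have e1 : 2^(j+1) = 2 * 2^j := by ring
      have h1 : 1 ≤ 2^j := Nat.one_le_two_pow
      have hq0 : ¬ (q = 0) := by omega
      have hpar := ih ((q-1)/2) (by omega) (by omega)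
      rw [pvFillVal_eq, if_neg hq0, if_pos hpar]

-- the level-wise precondition implies the position-wise conditions the invariants need
lemma pvPre_bridge (cl cr : List Int) (depth : Int)
    (hpre : Pre_get_positions_in_complete_binary_tree cl cr depth) :
    (∀ q < pvTotal depth, pvFillVal cl cr q ≠ -1 →
        (PySem.List.pyGet? cl (pvFillVal cl cr q)).isSome ∧
        (PySem.List.pyGet? cr (pvFillVal cl cr q)).isSome) ∧
    (∀ q < pvTotal depth, (pvTotal depth - 1) / 2 ≤ q → pvFillVal cl cr q ≠ -1 →
        PySem.List.pyGet? cl (pvFillVal cl cr q) = some (-1) ∧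
        PySem.List.pyGet? cr (pvFillVal cl cr q) = some (-1)) := by
  obtain ⟨hd0, hC1, hC2, hC3⟩ := hpre
  have hE1 : 1 ≤ (depth + 1).toNat := by omega
  have hT : pvTotal depth = 2^(depth + 1).toNat - 1 := rfl
  -- the level of an arbitrary position
  have hlevel : ∀ q : Nat, 2^Nat.log2 (q+1) - 1 ≤ q ∧ q < 2^(Nat.log2 (q+1) + 1) - 1 := by
    intro q
    have h1 := Nat.log2_self_le (by omega : q + 1 ≠ 0)
    have h2 := Nat.lt_log2_self (n := q + 1)
    omega
  have hlt : ∀ q : Nat, q < pvTotal depth → Nat.log2 (q+1) < (depth + 1).toNat := by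
    intro q hq
    by_contra hge
    have := Nat.pow_le_pow_right (by omega : 1 ≤ 2) (by omega : (depth + 1).toNat ≤ Nat.log2 (q+1))
    have := (hlevel q).1
    omega
  by_cases hc : (depth + 1).toNat ≤ 2 * cl.length + 1
  · constructor
    · intro q hq hf
      have hk := hlt q hq
      exact hC1 _ (lt_min hk (by omega))
        _ (pvLevel_complete cl cr _ q (hlevel q).1 (hlevel q).2 hf)
    · intro q hq hbot hf
      have e1 : 2^(depth + 1).toNat = 2 * 2^((depth + 1).toNat - 1) := by
        rw [← pow_succ']
        congr 1
        omega
      have h1 : 1 ≤ 2^((depth + 1).toNat - 1) := Nat.one_le_two_pow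
      have hrange1 : 2^((depth + 1).toNat - 1) - 1 ≤ q := by rw [hT] at hbot; omega
      have hrange2 : q < 2^(((depth + 1).toNat - 1) + 1) - 1 := by
        rw [hT] at hq; omega
      exact hC2 hc _ (pvLevel_complete cl cr _ q hrange1 hrange2 hf)
  · have hdead0 : ∀ q, 2^(2 * cl.length) - 1 ≤ q → q < 2^(2 * cl.length + 1) - 1 →
        pvFillVal cl cr q = -1 := by
      intro q h1 h2
      by_contra hf
      have := pvLevel_complete cl cr _ q h1 h2 hf
      rw [hC3 (by omega)] at this
      simp at this
    have hdead := pvFill_dead cl cr _ hdead0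
    constructor
    · intro q hq hf
      by_cases hk : Nat.log2 (q+1) < 2 * cl.length + 1
      · exact hC1 _ (lt_min (hlt q hq) hk)
          _ (pvLevel_complete cl cr _ q (hlevel q).1 (hlevel q).2 hf)
      · exfalso
        apply hf
        apply hdead
        have := Nat.pow_le_pow_right (by omega : 1 ≤ 2)
          (by omega : 2 * cl.length ≤ Nat.log2 (q+1))
        have := (hlevel q).1
        omega
    · intro q hq hbot hf
      exfalso
      apply hf
      apply hdead
      have e1 : 2^(depth + 1).toNat = 2 * 2^((depth + 1).toNat - 1) := by
        rw [← pow_succ']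
        congr 1
        omega
      have h2 : 2^(2 * cl.length) ≤ 2^((depth + 1).toNat - 1) :=
        Nat.pow_le_pow_right (by omega) (by omega)
      rw [hT] at hbot
      omega

lemma pvA_eq_fill (cl cr : List Int) (depth : Int)
    (hd0 : 0 ≤ depth)
    (hp1 : ∀ q < pvTotal depth, pvFillVal cl cr q ≠ -1 →
        (PySem.List.pyGet? cl (pvFillVal cl cr q)).isSome ∧
        (PySem.List.pyGet? cr (pvFillVal cl cr q)).isSome)
    (hp2 : ∀ q < pvTotal depth, (pvTotal depth - 1) / 2 ≤ q → pvFillVal cl cr q ≠ -1 →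
        PySem.List.pyGet? cl (pvFillVal cl cr q) = some (-1) ∧
        PySem.List.pyGet? cr (pvFillVal cl cr q) = some (-1)) :
    get_positions_in_complete_binary_tree cl cr depth =
      (List.range (pvTotal depth)).map (pvFillVal cl cr) := by
  have hT : 0 < pvTotal depth := by
    have h1 : 1 ≤ (depth + 1).toNat := by omega
    have h2 : 2^1 ≤ 2^(depth + 1).toNat := Nat.pow_le_pow_right (by omega) h1
    unfold pvTotal; omega
  have hfill0 : pvFillVal cl cr 0 = 0 := rfl
  have hq0 : ([0] : List Nat).map (fun p => (pvFillVal cl cr p, (p : Int))) =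
      [((0 : Int), (0 : Int))] := by simp [hfill0]
  unfold get_positions_in_complete_binary_tree
  rw [← hq0]
  apply pvALoop_inv cl cr (pvTotal depth) hp1 hp2
  · simp
  · intro p hp
    simp only [List.mem_singleton] at hp
    subst hp
    exact ⟨hT, by rw [hfill0]; decide⟩
  · simp
  · intro q hq
    have hrep : (List.replicate (pvTotal depth) (-1 : Int)).getD q 0 = -1 := by
      rw [List.getD_eq_getElem _ _ (by simpa using hq)]
      simp
    rw [hrep]
    by_cases hcond : pvFillVal cl cr q ≠ -1 ∧ ∃ p ∈ ([0] : List Nat), p ∈ pvAnc q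
    · rw [if_pos hcond]
    · rw [if_neg hcond]
      by_contra hne
      exact hcond ⟨fun h => hne h.symm, 0, List.mem_singleton.2 rfl, pvAnc_zero q⟩
  · exact le_trans (Finset.card_filter_le _ _) (by simp)

lemma pvB_eq_fill (cl cr : List Int) (depth : Int)
    (hd0 : 0 ≤ depth)
    (hp1 : ∀ q < pvTotal depth, pvFillVal cl cr q ≠ -1 →
        (PySem.List.pyGet? cl (pvFillVal cl cr q)).isSome ∧
        (PySem.List.pyGet? cr (pvFillVal cl cr q)).isSome) :
    get_positions_in_complete_binary_tree_alt cl cr depth =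
      (List.range (pvTotal depth)).map (pvFillVal cl cr) := by
  have hT : 0 < pvTotal depth := by
    have h1 : 1 ≤ (depth + 1).toNat := by omega
    have h2 : 2^1 ≤ 2^(depth + 1).toNat := Nat.pow_le_pow_right (by omega) h1
    unfold pvTotal; omega
  unfold get_positions_in_complete_binary_tree_alt
  simp only [if_pos hT]
  rw [pvBScatter_inv cl cr (pvTotal depth) hT hp1 (pvTotal depth) le_rfl]
  apply List.map_congr_left
  intro q hq
  rw [if_pos (by simp at hq; omega : q ≤ 2 * pvTotal depth)]

-- ===== VERDICT (by name: the statement is the Claim_ definition above) =====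
theorem get_positions_in_complete_binary_tree_spec : Claim_equal_get_positions_in_complete_binary_tree := by
  intro cl cr depth _ hpre
  obtain ⟨hp1, hp2⟩ := pvPre_bridge cl cr depth hpre
  unfold Spec_get_positions_in_complete_binary_tree
  rw [pvA_eq_fill cl cr depth hpre.1 hp1 hp2, pvB_eq_fill cl cr depth hpre.1 hp1]
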